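-- pv_equiv track=rewrite | github.com/rahulsamant37/Daily-Task | codeforces/cp-templates/python/string-algorithms/ZAlgirthm.py | z_algorithm_search
-- ===== SOURCE A (Python) =====
-- def z_function(s):
--     """
--     Z-algorithm implementation
--     z[i] = length of longest substring starting from s[i] which is also prefix of s
--     Time complexity: O(n)
--
--     Args:
--         s: input string
--
--     Returns:
--         z array where z[i] is length of longest common prefix of s and s[i:]
--     """
--     n = len(s)
--     z = [0] * n
--     z[0] = n
--
--     l, r = 0, 0
--     for i in range(1, n):
--         if i <= r:
--             z[i] = min(r - i + 1, z[i - l])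
--
--         while i + z[i] < n and s[z[i]] == s[i + z[i]]:
--             z[i] += 1
--
--         if i + z[i] - 1 > r:
--             l, r = i, i + z[i] - 1
--
--     return z
--
-- def z_algorithm_search(text, pattern):
--     """
--     Use Z-algorithm for pattern matching
--
--     Args:
--         text: text string to search in
--         pattern: pattern to search for
--
--     Returns:
--         list of starting indices where pattern occurs
--     """
--     if not pattern or not text:
--         return []
--
--     # Create combined string: pattern + '#' + text
--     combined = pattern + '#' + text
--     z = z_function(combined)
--
--     matches = []
--     pattern_len = len(pattern)
--
--     # Look for Z-values equal to pattern length
--     for i in range(pattern_len + 1, len(combined)):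
--         if z[i] == pattern_len:
--             # Found match at position i - pattern_len - 1 in original text
--             matches.append(i - pattern_len - 1)
--
--     return matches
-- ===== SOURCE B (Python) =====
-- def z_algorithm_search(text, pattern):
--     """Direct sliding-window pattern matching: test every start via slice compare."""
--     if not pattern or not text:
--         return []
--     m = len(pattern)
--     return [i for i in range(len(text) - m + 1) if text[i:i + m] == pattern]
-- ===== Notes on version B (the rewrite author's own statement) =====
-- stated objective: simpler
-- what changed: Replaces the Z-function over pattern+'#'+text with a direct sliding-window scan that slice-compares the pattern at every start position (C-level slicing instead of the interpreted per-character Z loop); this also removes A's sentinel collision, which silently drops occurrences immediately followed by '#' in the text.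
-- intended difference: On inputs where some occurrence of the pattern in the text is immediately followed by the character '#', A's Z-value overshoots past its '#' sentinel and A omits exactly those occurrences (e.g. text 'a#', pattern 'a': A returns []), while B returns every occurrence ([0]), which is the intended result of pattern matching. — e.g. on z_algorithm_search("a#", "a"): A returns [], B returns [0]
import Mathlib
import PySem

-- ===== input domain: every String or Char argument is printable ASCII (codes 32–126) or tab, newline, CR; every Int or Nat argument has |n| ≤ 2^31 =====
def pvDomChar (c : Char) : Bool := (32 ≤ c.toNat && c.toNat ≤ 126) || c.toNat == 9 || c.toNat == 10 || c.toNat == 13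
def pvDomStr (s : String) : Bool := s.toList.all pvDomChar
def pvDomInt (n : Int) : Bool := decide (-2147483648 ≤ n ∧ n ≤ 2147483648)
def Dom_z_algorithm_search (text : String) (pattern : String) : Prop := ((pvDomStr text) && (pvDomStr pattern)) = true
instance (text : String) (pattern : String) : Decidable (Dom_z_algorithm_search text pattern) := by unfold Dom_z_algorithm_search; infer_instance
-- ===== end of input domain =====

-- B replaces the Z-function-over-sentinel algorithm by a direct sliding-window scan (simpler, and
-- correct when an occurrence is immediately followed by '#' in the text, where A drops the match).

-- ===== PORT A =====

-- the `while i + z[i] < n and s[z[i]] == s[i + z[i]]: z[i] += 1` loop of z_function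
-- structural recursion on fuel = s.length - (i + k): the Python loop condition
-- `i + z[i] < n` forces the loop to stop before the fuel runs out
def pvZextGo (s : List Char) (i : Nat) : Nat → Nat → Nat
  | 0, k => k
  | fuel + 1, k =>
    if i + k < s.length ∧ s[k]? = s[i + k]? then pvZextGo s i fuel (k + 1) else k

def pvZext (s : List Char) (i : Nat) (k : Nat) : Nat :=
  pvZextGo s i (s.length - (i + k)) k

-- one iteration of the `for i in range(1, n)` loop of z_function; state = (z, l, r)
def pvZstep (s : List Char) (st : List Nat × Nat × Nat) (i : Nat) : List Nat × Nat × Nat :=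
  let z := st.1; let l := st.2.1; let r := st.2.2
  let zi0 := if i ≤ r then min (r - i + 1) (z.getD (i - l) 0) else z.getD i 0
  let zi := pvZext s i zi0
  let z' := z.set i zi
  if r < i + zi - 1 then (z', i, i + zi - 1) else (z', l, r)

-- port of z_function (on List Char); defined (as []) on the empty string, on which the
-- Python z_function raises — z_algorithm_search never calls it there
def pvZfun (s : List Char) : List Nat :=
  let n := s.length
  if n = 0 then [] else
    ((List.range' 1 (n - 1)).foldl (pvZstep s) ((List.replicate n 0).set 0 n, 0, 0)).1

def z_algorithm_search (text : String) (pattern : String) : List Int :=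
  if pattern.toList = [] ∨ text.toList = [] then [] else
    let combined := pattern.toList ++ '#' :: text.toList
    let z := pvZfun combined
    let patternLen := pattern.toList.length
    (List.range' (patternLen + 1) (combined.length - (patternLen + 1))).foldl
      (fun acc i =>
        if z.getD i 0 = patternLen then acc ++ [(i : Int) - patternLen - 1] else acc) []

-- ===== PORT B =====
def z_algorithm_search_alt (text : String) (pattern : String) : List Int :=
  if pattern.toList = [] ∨ text.toList = [] then [] else
    let t := text.toList
    let m := pattern.toList.length
    ((List.range (t.length - m + 1)).filter
      (fun j => (t.drop j).take m == pattern.toList)).map (fun (j : Nat) => (j : Int))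

-- ===== PRECONDITION & SPEC =====
-- On inputs where some occurrence of the pattern in the text is immediately followed by '#',
-- A's Z-value overshoots past its '#' sentinel and A omits exactly those occurrences,
-- while B returns every occurrence, which is the intended result of pattern matching.
-- linear scanner: does pattern ++ ['#'] occur in the text?  acc = the already-read
-- prefix, reversed; at each '#' the pattern is compared against the chars just read
def pvSharpScan (p : List Char) (acc : List Char) : List Char → Bool
  | [] => false
  | c :: cs =>
    ((c == '#') && (acc.take p.length == p.reverse)) || pvSharpScan p (c :: acc) cs

def D_z_algorithm_search (text : String) (pattern : String) : Prop :=
  pattern.toList ≠ [] ∧ pvSharpScan pattern.toList [] text.toList = true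
instance (text : String) (pattern : String) : Decidable (D_z_algorithm_search text pattern) := by
  unfold D_z_algorithm_search; infer_instance

def Spec_z_algorithm_search (text : String) (pattern : String) (out : List Int) : Prop :=
  ¬ D_z_algorithm_search text pattern → out = z_algorithm_search_alt text pattern
instance (text : String) (pattern : String) (out : List Int) :
    Decidable (Spec_z_algorithm_search text pattern out) := by
  unfold Spec_z_algorithm_search; infer_instance

def pvDiffWitness_z_algorithm_search : String × String := ("a#", "a")
def pvDiffWitnessOut_z_algorithm_search : (List Int) × (List Int) := ([], [0])

-- ===== CLAIM (what is proved, stated in full; the proofs are below) =====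
def Claim_unchanged_z_algorithm_search : Prop := ∀ (text : String) (pattern : String), Dom_z_algorithm_search text pattern → Spec_z_algorithm_search text pattern (z_algorithm_search text pattern)
def Claim_changed_z_algorithm_search : Prop := Dom_z_algorithm_search (pvDiffWitness_z_algorithm_search.1) (pvDiffWitness_z_algorithm_search.2) ∧ D_z_algorithm_search (pvDiffWitness_z_algorithm_search.1) (pvDiffWitness_z_algorithm_search.2) ∧ z_algorithm_search (pvDiffWitness_z_algorithm_search.1) (pvDiffWitness_z_algorithm_search.2) = pvDiffWitnessOut_z_algorithm_search.1 ∧ z_algorithm_search_alt (pvDiffWitness_z_algorithm_search.1) (pvDiffWitness_z_algorithm_search.2) = pvDiffWitnessOut_z_algorithm_search.2 ∧ pvDiffWitnessOut_z_algorithm_search.1 ≠ pvDiffWitnessOut_z_algorithm_search.2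
def Claim_exact_z_algorithm_search : Prop := ∀ (text : String) (pattern : String), Dom_z_algorithm_search text pattern → D_z_algorithm_search text pattern → z_algorithm_search text pattern ≠ z_algorithm_search_alt text pattern

-- ===== LEMMAS AND PROOFS =====

-- longest common prefix length of two char lists
def pvLcp : List Char → List Char → Nat
  | a :: as, b :: bs => if a = b then pvLcp as bs + 1 else 0
  | _, _ => 0

theorem pvLcp_refl (a : List Char) : pvLcp a a = a.length := by
  induction a with
  | nil => rfl
  | cons x xs ih => simp [pvLcp, ih]

theorem pvLcp_le_right (a b : List Char) : pvLcp a b ≤ b.length := by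
  induction a generalizing b with
  | nil => simp [pvLcp]
  | cons x xs ih =>
    cases b with
    | nil => simp [pvLcp]
    | cons y ys =>
      by_cases h : x = y
      · simp only [pvLcp, if_pos h, List.length_cons]
        have := ih ys; omega
      · simp [pvLcp, h]

theorem pvLcp_getElem? (a b : List Char) (j : Nat) (h : j < pvLcp a b) :
    a[j]? = b[j]? ∧ j < a.length ∧ j < b.length := by
  induction a generalizing b j with
  | nil => simp [pvLcp] at h
  | cons x xs ih =>
    cases b with
    | nil => simp [pvLcp] at h
    | cons y ys =>
      by_cases hxy : x = y
      · simp only [pvLcp, if_pos hxy] at h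
        cases j with
        | zero => simp [hxy]
        | succ j =>
          obtain ⟨e, l1, l2⟩ := ih ys j (by omega)
          exact ⟨by simpa using e, by simp; omega, by simp; omega⟩
      · simp [pvLcp, hxy] at h

theorem pvLcp_stop (a b : List Char) (h : a[pvLcp a b]? = b[pvLcp a b]?) :
    a[pvLcp a b]? = none := by
  induction a generalizing b with
  | nil => simp
  | cons x xs ih =>
    cases b with
    | nil => exfalso; simpa [pvLcp] using h
    | cons y ys =>
      by_cases hxy : x = y
      · simp only [pvLcp, if_pos hxy] at h ⊢
        simpa using ih ys (by simpa using h)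
      · exfalso
        apply hxy
        simpa [pvLcp, hxy] using h

theorem pvLcp_eq (a b : List Char) (k : Nat)
    (h1 : ∀ j < k, a[j]? = b[j]? ∧ (a[j]?).isSome)
    (h2 : a[k]? = b[k]? → a[k]? = none) : pvLcp a b = k := by
  induction a generalizing b k with
  | nil =>
    cases k with
    | zero => rfl
    | succ k => have := (h1 0 (by omega)).2; simp at this
  | cons x xs ih =>
    cases b with
    | nil =>
      cases k with
      | zero => simp [pvLcp]
      | succ k => have := (h1 0 (by omega)).1; simp at this
    | cons y ys =>
      cases k with
      | zero =>
        by_cases hxy : x = y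
        · subst hxy; simp at h2
        · simp [pvLcp, hxy]
      | succ k =>
        have hx : x = y := by have := (h1 0 (by omega)).1; simpa using this
        simp only [pvLcp, if_pos hx]
        have : pvLcp xs ys = k := by
          apply ih ys k
          · intro j hj; simpa using h1 (j+1) (by omega)
          · intro h; simpa using h2 (by simpa using h)
        omega

-- the while-loop computes exactly the Z-value, from any sound starting point
theorem pvZextGo_eq (s : List Char) (i : Nat) (fuel : Nat) :
    ∀ k, s.length ≤ i + k + fuel →
      (∀ j < k, i + j < s.length ∧ s[j]? = s[i + j]?) →
      pvZextGo s i fuel k = pvLcp s (s.drop i) := by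
  induction fuel with
  | zero =>
    intro k hf hk
    simp only [pvZextGo]
    refine (pvLcp_eq _ _ k ?_ ?_).symm
    · intro j hj
      obtain ⟨h1, h2⟩ := hk j hj
      constructor
      · rw [List.getElem?_drop]; exact h2
      · simp [List.getElem?_eq_getElem (show j < s.length by omega)]
    · intro h
      rw [List.getElem?_drop] at h
      rw [h]
      exact List.getElem?_eq_none (by omega)
  | succ fuel ih =>
    intro k hf hk
    simp only [pvZextGo]
    split
    · rename_i hcond
      apply ih (k+1) (by omega)
      intro j hj
      rcases Nat.lt_or_ge j k with hj' | hj'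
      · exact hk j hj'
      · have : j = k := by omega
        subst this
        exact ⟨hcond.1, hcond.2⟩
    · rename_i hcond
      refine (pvLcp_eq _ _ k ?_ ?_).symm
      · intro j hj
        obtain ⟨h1, h2⟩ := hk j hj
        constructor
        · rw [List.getElem?_drop]; exact h2
        · simp [List.getElem?_eq_getElem (show j < s.length by omega)]
      · intro h
        rw [List.getElem?_drop] at h
        rcases Nat.lt_or_ge (i + k) s.length with hik | hik
        · exact absurd ⟨hik, h⟩ hcond
        · rw [h]; exact List.getElem?_eq_none (by omega)

theorem pvZext_eq (s : List Char) (i k : Nat)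
    (hk : ∀ j < k, i + j < s.length ∧ s[j]? = s[i + j]?) :
    pvZext s i k = pvLcp s (s.drop i) :=
  pvZextGo_eq s i (s.length - (i + k)) k (by omega) hk

-- getD after set
theorem pv_getD_set (l : List Nat) (i j a : Nat) :
    (l.set i a).getD j 0 = if i = j ∧ i < l.length then a else l.getD j 0 := by
  unfold List.getD
  rcases eq_or_ne i j with h | h
  · subst h
    by_cases hl : i < l.length
    · simp [List.getElem?_set_self', hl]
    · simp [hl, List.set_eq_of_length_le (show l.length ≤ i by omega)]
  · simp [List.getElem?_set_ne h, h]

-- loop invariant for z_function's main for-loop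
def pvZInv (s : List Char) (i : Nat) (st : List Nat × Nat × Nat) : Prop :=
  st.1.length = s.length ∧
  (∀ j < i, st.1.getD j 0 = pvLcp s (s.drop j)) ∧
  (∀ j, i ≤ j → st.1.getD j 0 = 0) ∧
  ((st.2.1 = 0 ∧ st.2.2 = 0) ∨
    (1 ≤ st.2.1 ∧ st.2.1 < i ∧ st.2.2 < st.2.1 + pvLcp s (s.drop st.2.1)))

theorem pvZstep_inv (s : List Char) (i : Nat) (st : List Nat × Nat × Nat)
    (h1 : 1 ≤ i) (h2 : i < s.length) (hInv : pvZInv s i st) :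
    pvZInv s (i + 1) (pvZstep s st i) := by
  obtain ⟨hlen, hz, hz0, hw⟩ := hInv
  obtain ⟨z, l, r⟩ := st
  simp only at hlen hz hz0 hw
  simp only [pvZstep]
  set zi0 := if i ≤ r then min (r - i + 1) (z.getD (i - l) 0) else z.getD i 0 with hzi0
  have hsound : ∀ j < zi0, i + j < s.length ∧ s[j]? = s[i + j]? := by
    intro j hj
    by_cases hir : i ≤ r
    · rcases hw with ⟨hl0, hr0⟩ | ⟨hl1, hli, hr⟩
      · omega
      · rw [hzi0, if_pos hir, hz (i - l) (by omega)] at hj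
        have hjr : i + j ≤ r := by omega
        have hjl : j < pvLcp s (s.drop (i - l)) := by omega
        obtain ⟨e1, _, e3⟩ := pvLcp_getElem? _ _ j hjl
        rw [List.getElem?_drop] at e1
        have hd : i - l + j < pvLcp s (s.drop l) := by omega
        obtain ⟨f1, _, f3⟩ := pvLcp_getElem? _ _ (i - l + j) hd
        rw [List.getElem?_drop] at f1
        have hlen' : pvLcp s (s.drop l) ≤ s.length - l := by
          have := pvLcp_le_right s (s.drop l); simpa using this
        refine ⟨by omega, ?_⟩
        rw [show l + (i - l + j) = i + j by omega] at f1
        rw [e1]; exact f1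
    · rw [hzi0, if_neg hir, hz0 i (Nat.le_refl i)] at hj
      omega
  have hzi : pvZext s i zi0 = pvLcp s (s.drop i) := pvZext_eq s i zi0 hsound
  rw [hzi]
  set Zi := pvLcp s (s.drop i) with hZi
  have hset : ∀ j, (z.set i Zi).getD j 0 = if i = j then Zi else z.getD j 0 := by
    intro j
    rw [pv_getD_set]
    rcases eq_or_ne i j with h | h
    · subst h; rw [if_pos ⟨rfl, by omega⟩, if_pos rfl]
    · rw [if_neg (by tauto), if_neg h]
  have hfst : (if r < i + Zi - 1 then (z.set i Zi, i, i + Zi - 1) else (z.set i Zi, l, r)).1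
      = z.set i Zi := by split <;> rfl
  refine ⟨?_, ?_, ?_, ?_⟩
  · rw [hfst]; simp [hlen]
  · intro j hj
    rw [hfst, hset]
    rcases eq_or_ne i j with h | h
    · rw [if_pos h]; rw [← h]
    · rw [if_neg h]; exact hz j (by omega)
  · intro j hj
    rw [hfst, hset, if_neg (by omega)]
    exact hz0 j (by omega)
  · by_cases hbr : r < i + Zi - 1
    · rw [if_pos hbr]
      right
      refine ⟨h1, ?_, ?_⟩
      · show i < i + 1; omega
      · show i + Zi - 1 < i + Zi; omega
    · rw [if_neg hbr]
      rcases hw with ⟨hl0, hr0⟩ | ⟨hl1, hli, hr⟩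
      · left; exact ⟨hl0, hr0⟩
      · right
        refine ⟨hl1, ?_, ?_⟩
        · show l < i + 1; omega
        · show r < l + pvLcp s (List.drop l s); exact hr

theorem pvZloop_inv (s : List Char) :
    ∀ (c a : Nat) (st : List Nat × Nat × Nat), 1 ≤ a → a + c ≤ s.length → pvZInv s a st →
      pvZInv s (a + c) ((List.range' a c).foldl (pvZstep s) st) := by
  intro c
  induction c with
  | zero => intro a st _ _ h; simpa using h
  | succ c ih =>
    intro a st ha hac hInv
    rw [List.range'_1_concat, List.foldl_append]
    simp only [List.foldl_cons, List.foldl_nil]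
    have := pvZstep_inv s (a + c) ((List.range' a c).foldl (pvZstep s) st)
      (by omega) (by omega) (ih a st ha (by omega) hInv)
    simpa [show a + c + 1 = a + (c + 1) by omega] using this

theorem pvZfun_getD (s : List Char) (hs : s ≠ []) (j : Nat) (hj : j < s.length) :
    (pvZfun s).getD j 0 = pvLcp s (s.drop j) := by
  have hn : s.length ≠ 0 := by simpa using hs
  unfold pvZfun
  simp only [if_neg hn]
  have hInit : pvZInv s 1 ((List.replicate s.length 0).set 0 s.length, 0, 0) := by
    refine ⟨by simp, ?_, ?_, Or.inl ⟨rfl, rfl⟩⟩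
    · intro j hj
      interval_cases j
      rw [pv_getD_set]
      simp [pvLcp_refl, Nat.pos_of_ne_zero hn]
    · intro j hj
      rw [pv_getD_set, if_neg (by omega)]
      unfold List.getD
      rcases Nat.lt_or_ge j s.length with h | h
      · simp [List.getElem?_replicate, h]
      · simp [List.getElem?_eq_none (by simpa using h)]
  have := pvZloop_inv s (s.length - 1) 1 _ (Nat.le_refl 1) (by omega) hInit
  rw [show 1 + (s.length - 1) = s.length by omega] at this
  exact this.2.1 j hj

-- characterization of Z-values of pattern ++ '#' :: rest against a suffix u
theorem pvLcp_combined (p rest u : List Char) :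
    pvLcp (p ++ '#' :: rest) u = p.length ↔
      (u.take p.length = p ∧ u[p.length]? ≠ some '#') := by
  have hsm : (p ++ '#' :: rest)[p.length]? = some '#' := by
    rw [List.getElem?_append_right (Nat.le_refl p.length)]
    simp
  constructor
  · intro h
    have hj : ∀ j < p.length, u[j]? = p[j]? := by
      intro j hj'
      obtain ⟨e1, _, _⟩ := pvLcp_getElem? (p ++ '#' :: rest) u j (by rw [h]; exact hj')
      rw [List.getElem?_append_left hj'] at e1
      exact e1.symm
    constructor
    · apply List.ext_getElem?
      intro j
      rcases Nat.lt_or_ge j p.length with hlt | hge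
      · rw [List.getElem?_take_of_lt hlt, hj j hlt]
      · rw [List.getElem?_eq_none (by simp; omega), List.getElem?_eq_none (by omega)]
    · intro hu
      have := pvLcp_stop (p ++ '#' :: rest) u (by rw [h, hsm, hu])
      rw [h, hsm] at this
      simp at this
  · rintro ⟨htake, hne⟩
    have hul : p.length ≤ u.length := by
      have := congrArg List.length htake
      simp at this
      omega
    apply pvLcp_eq
    · intro j hj
      have h1 : u[j]? = p[j]? := by
        have := congrArg (fun l => l[j]?) htake
        simpa [List.getElem?_take_of_lt hj] using this
      refine ⟨by rw [List.getElem?_append_left hj, ← h1], ?_⟩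
      rw [List.getElem?_append_left hj]
      simp [List.getElem?_eq_getElem (show j < p.length from hj)]
    · intro h
      rw [hsm] at h
      exact absurd h.symm hne

-- the searched-over suffixes of combined are exactly the suffixes of text
theorem pv_drop_combined (p t : List Char) (j : Nat) :
    (p ++ '#' :: t).drop (p.length + 1 + j) = t.drop j := by
  rw [List.drop_append, List.drop_eq_nil_of_le (by omega),
    show p.length + 1 + j - p.length = j + 1 by omega]
  simp

-- an occurrence needs room: if the take equals p then j + |p| ≤ |t|
theorem pv_occ_room (t p : List Char) (j : Nat) (hj : j ≤ t.length)
    (h : (t.drop j).take p.length = p) : j + p.length ≤ t.length := by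
  have := congrArg List.length h
  simp at this
  omega

theorem pv_range_split (k N : Nat) (h : k ≤ N) :
    List.range N = List.range k ++ List.range' k (N - k) := by
  rw [List.range_eq_range', List.range_eq_range', show N = k + (N - k) by omega,
    ← List.range'_append_1]
  simp

-- A's output, in closed form: the positions whose Z-value is exactly |pattern|
theorem pvA_eq (text pattern : String) (hp : pattern.toList ≠ []) (ht : text.toList ≠ []) :
    z_algorithm_search text pattern =
      ((List.range text.toList.length).filter
        (fun j => decide ((text.toList.drop j).take pattern.toList.length = pattern.toList ∧
          text.toList[j + pattern.toList.length]? ≠ some '#'))).map (fun (j : Nat) => (j : Int)) := by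
  set p := pattern.toList with hpdef
  set t := text.toList with htdef
  set m := p.length with hmdef
  set s := p ++ '#' :: t with hsdef
  have hs : s ≠ [] := by simp [hsdef]
  have hslen : s.length = m + 1 + t.length := by simp [hsdef]; omega
  have h1 : z_algorithm_search text pattern =
      (List.range' (m + 1) (s.length - (m + 1))).foldl
        (fun acc i => if (pvZfun s).getD i 0 = m then acc ++ [(i : Int) - m - 1] else acc) [] := by
    unfold z_algorithm_search
    rw [if_neg (by push_neg; exact ⟨hp, ht⟩)]
  rw [h1, PySem.List.foldl_append_ite, List.nil_append,
    show s.length - (m + 1) = t.length by omega,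
    List.range'_eq_map_range, List.filter_map, List.map_map]
  have hfc : List.filter ((fun i => decide ((pvZfun s).getD i 0 = m)) ∘ (fun x => m + 1 + x))
      (List.range t.length) =
      List.filter (fun j => decide ((t.drop j).take m = p ∧ t[j + m]? ≠ some '#'))
      (List.range t.length) := by
    apply List.filter_congr
    intro j hj
    rw [List.mem_range] at hj
    simp only [Function.comp]
    have hg : (pvZfun s).getD (m + 1 + j) 0 = pvLcp s (s.drop (m + 1 + j)) :=
      pvZfun_getD s hs (m + 1 + j) (by omega)
    have hd : s.drop (m + 1 + j) = t.drop j := pv_drop_combined p t j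
    have hco := pvLcp_combined p t (t.drop j)
    rw [← hsdef] at hco
    have hget : (t.drop j)[m]? = t[j + m]? := by
      rw [List.getElem?_drop]
    simp only [decide_eq_decide]
    rw [hg, hd, hco, hget]
  rw [hfc]
  apply List.map_congr_left
  intro j hj
  simp only [Function.comp]
  push_cast
  ring

-- B's output, in closed form over the same index range
theorem pvB_eq (text pattern : String) (hp : pattern.toList ≠ []) (ht : text.toList ≠ []) :
    z_algorithm_search_alt text pattern =
      ((List.range text.toList.length).filter
        (fun j => decide ((text.toList.drop j).take pattern.toList.length =
          pattern.toList))).map (fun (j : Nat) => (j : Int)) := by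
  set p := pattern.toList with hpdef
  set t := text.toList with htdef
  set m := p.length with hmdef
  have hm1 : 1 ≤ m := by
    rw [hmdef]
    cases hq : pattern.toList with
    | nil => exact absurd hq hp
    | cons c cs => rw [hpdef, hq]; simp
  have ht1 : 1 ≤ t.length := by
    cases hq : text.toList with
    | nil => exact absurd hq ht
    | cons c cs => rw [htdef, hq]; simp
  have h1 : z_algorithm_search_alt text pattern =
      ((List.range (t.length - m + 1)).filter
        (fun j => (t.drop j).take m == p)).map (fun (j : Nat) => (j : Int)) := by
    unfold z_algorithm_search_alt
    rw [if_neg (by push_neg; exact ⟨hp, ht⟩)]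
  rw [h1]
  congr 1
  rw [List.filter_congr (l := List.range (t.length - m + 1))
    (q := fun j => decide ((t.drop j).take m = p))
    (fun j _ => by by_cases hh : (t.drop j).take m = p <;> simp [hh])]
  rw [pv_range_split (t.length - m + 1) t.length (by omega), List.filter_append]
  rw [show (List.range' (t.length - m + 1) (t.length - (t.length - m + 1))).filter
      (fun j => decide ((t.drop j).take m = p)) = [] from ?_, List.append_nil]
  rw [List.filter_eq_nil_iff]
  intro j hj
  rw [List.mem_range'_1] at hj
  simp only [decide_eq_true_eq]
  intro hocc
  have := pv_occ_room t p j (by omega) hocc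
  omega

theorem pvSharpScan_iff (p : List Char) : ∀ (t acc : List Char),
    pvSharpScan p acc t = true ↔ ∃ u v, t = u ++ '#' :: v ∧ p.reverse <+: (u.reverse ++ acc) := by
  intro t
  induction t with
  | nil =>
    intro acc
    simp only [pvSharpScan]
    constructor
    · intro h; exact absurd h (by simp)
    · rintro ⟨u, v, hsplit, -⟩
      exact absurd hsplit.symm (by simp)
  | cons c cs ih =>
    intro acc
    simp only [pvSharpScan, Bool.or_eq_true, Bool.and_eq_true, beq_iff_eq]
    constructor
    · rintro (⟨hc, hpre⟩ | hrec)
      · refine ⟨[], cs, by rw [hc]; rfl, ?_⟩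
        simp only [List.reverse_nil, List.nil_append]
        apply List.prefix_iff_eq_take.mpr
        rw [List.length_reverse]
        exact hpre.symm
      · obtain ⟨u, v, hsplit, hpre⟩ := (ih (c :: acc)).mp hrec
        refine ⟨c :: u, v, by rw [hsplit]; rfl, ?_⟩
        simpa [List.append_assoc] using hpre
    · rintro ⟨u, v, hsplit, hpre⟩
      cases u with
      | nil =>
        left
        injection hsplit with h1 h2
        refine ⟨h1, ?_⟩
        simp only [List.reverse_nil, List.nil_append] at hpre
        have := List.prefix_iff_eq_take.mp hpre
        rw [List.length_reverse] at this
        exact this.symm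
      | cons a u' =>
        right
        injection hsplit with h1 h2
        apply (ih (c :: acc)).mpr
        refine ⟨u', v, h2, ?_⟩
        subst h1
        simpa [List.append_assoc] using hpre

theorem pvD_iff (text pattern : String) :
    D_z_algorithm_search text pattern ↔
      (pattern.toList ≠ [] ∧ ∃ j, j < text.toList.length ∧
        (text.toList.drop j).take pattern.toList.length = pattern.toList ∧
        text.toList[j + pattern.toList.length]? = some '#') := by
  unfold D_z_algorithm_search
  apply and_congr_right
  intro hp
  rw [pvSharpScan_iff]
  set p := pattern.toList
  set t := text.toList
  constructor
  · rintro ⟨u, v, hsplit, hpre⟩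
    have hsuf : p <:+ u := by
      rw [← List.reverse_prefix]
      simpa using hpre
    obtain ⟨w, hw⟩ := hsuf
    have hdropw : t.drop w.length = p ++ '#' :: v := by
      rw [hsplit, ← hw, List.append_assoc]
      exact List.drop_left
    refine ⟨w.length, ?_, ?_, ?_⟩
    · rw [hsplit, ← hw]; simp
    · rw [hdropw, List.take_left]
    · rw [show t[w.length + p.length]? = (t.drop w.length)[p.length]? from
        (List.getElem?_drop ..).symm, hdropw,
        List.getElem?_append_right (Nat.le_refl p.length)]
      simp
  · rintro ⟨j, hj, hocc, hsharp⟩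
    obtain ⟨hjm, hchar⟩ := List.getElem?_eq_some_iff.mp hsharp
    refine ⟨t.take (j + p.length), t.drop (j + p.length + 1), ?_, ?_⟩
    · conv_lhs => rw [← List.take_append_drop (j + p.length) t]
      congr 1
      rw [← List.getElem_cons_drop hjm, hchar]
    · rw [List.append_nil, List.reverse_prefix]
      have hd : (t.take (j + p.length)).drop j = p := by
        rw [List.drop_take]
        simpa [show j + p.length - j = p.length by omega] using hocc
      have hsuf := List.drop_suffix j (t.take (j + p.length))
      rw [hd] at hsuf
      exact hsuf

theorem z_algorithm_search_spec : Claim_unchanged_z_algorithm_search := by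
  unfold Claim_unchanged_z_algorithm_search
  intro text pattern _
  unfold Spec_z_algorithm_search
  intro hnD
  by_cases hpt : pattern.toList = [] ∨ text.toList = []
  · unfold z_algorithm_search z_algorithm_search_alt
    rw [if_pos hpt, if_pos hpt]
  · push_neg at hpt
    obtain ⟨hp, ht⟩ := hpt
    rw [pvA_eq text pattern hp ht, pvB_eq text pattern hp ht]
    congr 1
    apply List.filter_congr
    intro j hj
    simp only [decide_eq_decide]
    constructor
    · exact fun h => h.1
    · intro hocc
      refine ⟨hocc, ?_⟩
      intro hsharp
      apply hnD
      rw [pvD_iff]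
      exact ⟨hp, j, List.mem_range.mp hj, hocc, hsharp⟩

theorem z_algorithm_search_tight : Claim_exact_z_algorithm_search := by
  unfold Claim_exact_z_algorithm_search
  intro text pattern _ hD
  rw [pvD_iff] at hD
  obtain ⟨hp, j0, hj0, hocc, hsharp⟩ := hD
  have hj0mem : j0 ∈ List.range text.toList.length := List.mem_range.mpr hj0
  have ht : text.toList ≠ [] := by
    intro h; rw [h] at hj0; simp at hj0
  intro heq
  rw [pvA_eq text pattern hp ht, pvB_eq text pattern hp ht] at heq
  have hmemB : (j0 : Int) ∈ ((List.range text.toList.length).filter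
      (fun j => decide ((text.toList.drop j).take pattern.toList.length =
        pattern.toList))).map (fun (j : Nat) => (j : Int)) := by
    apply List.mem_map_of_mem
    rw [List.mem_filter]
    exact ⟨hj0mem, by simpa using hocc⟩
  rw [← heq] at hmemB
  rw [List.mem_map] at hmemB
  obtain ⟨j1, hj1mem, hj1eq⟩ := hmemB
  have : j1 = j0 := by exact_mod_cast hj1eq
  subst this
  rw [List.mem_filter] at hj1mem
  have := hj1mem.2
  simp only [decide_eq_true_eq] at this
  exact this.2 hsharp

-- ===== VERDICT (by name: the statement is the Claim_ definition above) =====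
theorem z_algorithm_search_changed : Claim_changed_z_algorithm_search := by
  unfold Claim_changed_z_algorithm_search; decide
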